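-- pv_equiv track=rewrite | github.com/HyeonwooNoh/VQA-Transfer-ExternalData | data/tools/visualgenome/merge_dataset_by_image.py | construct_image2id
-- ===== SOURCE A (Python) =====
-- def construct_image2id(id_pairs):
--     image2id = {}
--     for id_pair in id_pairs:
--         image_id, id = id_pair.split()
--         if image_id not in image2id:
--             image2id[image_id] = []
--         image2id[image_id].append(id)
--     return image2id
-- ===== SOURCE B (Python) =====
-- def construct_image2id(id_pairs):
--     pairs = []
--     for id_pair in id_pairs:
--         image_id, id = id_pair.split()
--         pairs.append((image_id, id))
--     keys = dict.fromkeys(image_id for image_id, _ in pairs)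
--     return {k: [v for k2, v in pairs if k2 == k] for k in keys}
-- ===== Notes on version B (the rewrite author's own statement) =====
-- stated objective: alternative
-- what changed: Replaces the single-pass dict-building loop (membership test + in-place append per pair) with a two-pass scheme: split all pairs into a list first, then build the dict by a comprehension that, for each first-occurrence-deduplicated key, filters the pair list for its values.
import Mathlib
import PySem

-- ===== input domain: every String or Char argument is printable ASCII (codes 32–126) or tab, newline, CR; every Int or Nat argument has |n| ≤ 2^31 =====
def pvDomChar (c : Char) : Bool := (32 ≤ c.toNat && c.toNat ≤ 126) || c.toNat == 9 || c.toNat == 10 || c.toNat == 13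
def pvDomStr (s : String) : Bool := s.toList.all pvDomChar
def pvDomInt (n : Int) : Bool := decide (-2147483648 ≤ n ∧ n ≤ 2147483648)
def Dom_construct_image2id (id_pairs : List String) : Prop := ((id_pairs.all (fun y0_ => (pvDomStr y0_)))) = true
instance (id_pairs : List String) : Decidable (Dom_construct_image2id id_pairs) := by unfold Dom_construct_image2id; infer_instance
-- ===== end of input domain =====

-- B replaces A's single-pass dict-building loop by split-all-pairs first, then a
-- per-distinct-key filter comprehension (alternative decomposition, same results).

-- ===== PORT A =====
-- A: one pass; for each pair, split, ensure key present with [], append the id.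
def construct_image2id (id_pairs : List String) : List (String × List String) :=
  (id_pairs.foldl (fun image2id id_pair =>
    match PySem.Str.split₀ id_pair with
    | [image_id, id] =>
        let image2id := if image2id.contains image_id then image2id
                        else image2id.insert image_id []
        image2id.insert image_id (image2id.getD image_id [] ++ [id])
    | _ => image2id)   -- Python raises ValueError here; excluded by Pre_
    PySem.Dict.empty).items

-- ===== PORT B =====
-- B: split every pair into (image_id, id) in order, then for each
-- first-occurrence-deduplicated key collect its ids by filtering the pair list.
def pvSplitPairs (id_pairs : List String) : List (String × String) :=
  id_pairs.foldl (fun pairs id_pair =>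
    pairs ++
      (if (PySem.Str.split₀ id_pair).length = 2 then
        [((PySem.Str.split₀ id_pair).getD 0 "", (PySem.Str.split₀ id_pair).getD 1 "")]
       else []))       -- two-target unpacking; != 2 fields raises ValueError, excluded by Pre_
    []

def construct_image2id_alt (id_pairs : List String) : List (String × List String) :=
  let pairs := pvSplitPairs id_pairs
  let keys := PySem.List.dedup (pairs.map Prod.fst)
  keys.map (fun k => (k, (pairs.filter (fun q => q.1 == k)).map Prod.snd))

-- ===== PRECONDITION & SPEC =====
-- Pre_ excludes exactly the inputs where some id_pair.split() does not yield two
-- fields, on which Python A (and B) raise ValueError during unpacking.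
def Pre_construct_image2id (id_pairs : List String) : Prop :=
  ∀ p ∈ id_pairs, (PySem.Str.split₀ p).length = 2
instance (id_pairs : List String) : Decidable (Pre_construct_image2id id_pairs) := by
  unfold Pre_construct_image2id; infer_instance
def pvWitness_construct_image2id : List String := ["1 a", "2 b", "1 c"]
def Spec_construct_image2id (id_pairs : List String) (out : List (String × List String)) : Prop := out = construct_image2id_alt id_pairs
instance (id_pairs : List String) (out : List (String × List String)) : Decidable (Spec_construct_image2id id_pairs out) := by unfold Spec_construct_image2id; infer_instance

-- ===== CLAIM (what is proved, stated in full; the proofs are below) =====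
def Claim_equal_construct_image2id : Prop := ∀ (id_pairs : List String), Dom_construct_image2id id_pairs → Pre_construct_image2id id_pairs → Spec_construct_image2id id_pairs (construct_image2id id_pairs)

-- ===== LEMMAS AND PROOFS =====

-- A's per-pair dict update (ensure-empty then append) is exactly Dict.modify.
theorem pvStepA_eq_modify (d : PySem.Dict String (List String)) (a b : String) :
    (let d1 := if d.contains a then d else d.insert a []
     d1.insert a (d1.getD a [] ++ [b])) = d.modify a [] (fun v => v ++ [b]) := by
  by_cases hc : d.contains a = true
  · simp [hc, PySem.Dict.modify]
  · have hget : d.getD a [] = [] := by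
      exact PySem.Dict.getD_of_not_contains _ _ (by simpa using hc)
    simp [hc, PySem.Dict.modify, hget, PySem.Dict.insert_insert_self,
      PySem.Dict.getD_insert_self]

-- splitPairs as a flatMap (B's first pass, restated structurally).
theorem pvSplitPairs_eq_flatMap (id_pairs : List String) :
    pvSplitPairs id_pairs =
      id_pairs.flatMap (fun p =>
        if (PySem.Str.split₀ p).length = 2 then
          [((PySem.Str.split₀ p).getD 0 "", (PySem.Str.split₀ p).getD 1 "")]
        else []) := by
  unfold pvSplitPairs
  exact PySem.List.foldl_append_eq_flatMap _ _ []

-- Under Pre_, A's fold over the strings is the modify-fold over the split pairs.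
theorem pvFoldA_eq_foldPairs (id_pairs : List String)
    (hpre : ∀ p ∈ id_pairs, (PySem.Str.split₀ p).length = 2) :
    ∀ d : PySem.Dict String (List String),
      id_pairs.foldl (fun image2id id_pair =>
        match PySem.Str.split₀ id_pair with
        | [image_id, id] =>
            let image2id := if image2id.contains image_id then image2id
                            else image2id.insert image_id []
            image2id.insert image_id (image2id.getD image_id [] ++ [id])
        | _ => image2id) d
      = (pvSplitPairs id_pairs).foldl
          (fun d q => d.modify q.1 [] (fun v => v ++ [q.2])) d := by
  induction id_pairs with
  | nil => intro d; rfl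
  | cons p rest ih =>
    intro d
    have hp := hpre p (by simp)
    rcases h : PySem.Str.split₀ p with _ | ⟨x, _ | ⟨y, _ | _⟩⟩ <;> simp [h] at hp ⊢
    rw [pvSplitPairs_eq_flatMap, List.flatMap_cons, List.foldl_append, h,
      ← pvSplitPairs_eq_flatMap]
    have h2 : (if ([x, y] : List String).length = 2 then
        [(([x, y] : List String).getD 0 "", ([x, y] : List String).getD 1 "")] else [])
        = [(x, y)] := by simp [List.getD]
    rw [h2]
    simp only [List.foldl_cons, List.foldl_nil]
    rw [ih (fun q hq => hpre q (by simp [hq]))]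
    congr 1
    exact pvStepA_eq_modify d x y

-- ===== VERDICT (by name: the statement is the Claim_ definition above) =====
theorem construct_image2id_spec : Claim_equal_construct_image2id := by
  intro id_pairs _ hpre
  unfold Spec_construct_image2id construct_image2id construct_image2id_alt
  rw [pvFoldA_eq_foldPairs id_pairs hpre]
  set P := pvSplitPairs id_pairs with hP
  have hkeys : ((P.foldl (fun d q => d.modify q.1 [] (fun v => v ++ [q.2]))
      PySem.Dict.empty)).keys = PySem.Set.ofList (P.map Prod.fst) := by
    rw [PySem.Dict.keys_foldl_modify_key P Prod.fst [] (fun _ q v => v ++ [q.2])]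
    rfl
  have hnd : ((P.foldl (fun d q => d.modify q.1 [] (fun v => v ++ [q.2]))
      PySem.Dict.empty)).keys.Nodup := by
    rw [hkeys]; exact PySem.Set.nodup_ofList _
  rw [PySem.Dict.items_eq_map_keys _ hnd [], hkeys]
  simp only [PySem.List.dedup_eq_ofList]
  apply List.map_congr_left
  intro k _
  rw [PySem.Dict.getD_foldl_modify_append]
  rfl
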